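-- pv_equiv track=rewrite | github.com/LudovicoBorro/Lab07 | model/model.py | _is_parziale_valid
-- ===== SOURCE A (Python) =====
-- def _is_parziale_valid(possibile_soluzione):
--     # In nessuna città si possono trascorre più di 6 giornate
--     for c in ["Genova", "Torino", "Milano"]:
--         counter = 0
--         for (citta, data) in possibile_soluzione:
--             if citta == c:
--                 counter += 1
--         if counter > 6:
--             return False
--     return True
-- ===== SOURCE B (Python) =====
-- def _is_parziale_valid(possibile_soluzione):
--     # Sort the relevant city names; a city occurs more than 6 times
--     # iff some window of 7 consecutive entries in the sorted list has
--     # equal endpoints (equal values are contiguous after sorting).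
--     rilevanti = sorted(citta for citta, data in possibile_soluzione
--                        if citta in ("Genova", "Torino", "Milano"))
--     return all(rilevanti[i] != rilevanti[i + 6]
--                for i in range(len(rilevanti) - 6))
-- ===== Notes on version B (the rewrite author's own statement) =====
-- stated objective: alternative
-- what changed: Replaces per-city counting scans with a sort-then-window algorithm: sort the relevant city names and check that no window of 7 consecutive sorted entries has equal endpoints.
import Mathlib
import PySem

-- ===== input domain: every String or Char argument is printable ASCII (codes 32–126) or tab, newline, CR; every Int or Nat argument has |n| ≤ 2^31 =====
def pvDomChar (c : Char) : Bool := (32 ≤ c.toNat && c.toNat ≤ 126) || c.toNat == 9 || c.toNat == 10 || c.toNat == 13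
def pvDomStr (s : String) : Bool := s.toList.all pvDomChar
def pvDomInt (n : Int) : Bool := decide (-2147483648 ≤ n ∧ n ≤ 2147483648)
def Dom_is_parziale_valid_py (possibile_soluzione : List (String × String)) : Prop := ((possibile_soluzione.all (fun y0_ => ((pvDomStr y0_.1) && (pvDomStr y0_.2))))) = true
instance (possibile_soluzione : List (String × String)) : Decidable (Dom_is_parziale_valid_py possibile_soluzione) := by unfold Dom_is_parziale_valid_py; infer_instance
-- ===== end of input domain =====

-- B sorts the relevant city names and checks that no 7-window of the sorted list has equal endpoints (alternative algorithm: sort-then-window instead of per-city counting scans).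
-- ===== PORT A =====
def is_parziale_valid_py (possibile_soluzione : List (String × String)) : Bool :=
  if possibile_soluzione.foldl (fun counter p => if p.1 == "Genova" then counter + 1 else counter) (0 : Int) > 6 then false
  else if possibile_soluzione.foldl (fun counter p => if p.1 == "Torino" then counter + 1 else counter) (0 : Int) > 6 then false
  else if possibile_soluzione.foldl (fun counter p => if p.1 == "Milano" then counter + 1 else counter) (0 : Int) > 6 then false
  else true

-- ===== PORT B =====
-- indexing rilevanti[i] / rilevanti[i+6] is ported with getD: both indices are always in range, so it is exact
def is_parziale_valid_py_alt (possibile_soluzione : List (String × String)) : Bool :=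
  let rilevanti := PySem.List.sorted
    ((possibile_soluzione.map (fun p => p.1)).filter
      (fun citta => citta == "Genova" || citta == "Torino" || citta == "Milano"))
    (fun x => x) false
  (List.range (rilevanti.length - 6)).all
    (fun i => rilevanti.getD i "" != rilevanti.getD (i + 6) "")

-- ===== PRECONDITION & SPEC =====
def Spec_is_parziale_valid_py (possibile_soluzione : List (String × String)) (out : Bool) : Prop := out = is_parziale_valid_py_alt possibile_soluzione
instance (possibile_soluzione : List (String × String)) (out : Bool) : Decidable (Spec_is_parziale_valid_py possibile_soluzione out) := by unfold Spec_is_parziale_valid_py; infer_instance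

-- ===== CLAIM (what is proved, stated in full; the proofs are below) =====
def Claim_equal_is_parziale_valid_py : Prop := ∀ (possibile_soluzione : List (String × String)), Dom_is_parziale_valid_py possibile_soluzione → Spec_is_parziale_valid_py possibile_soluzione (is_parziale_valid_py possibile_soluzione)

-- ===== LEMMAS AND PROOFS =====

-- A's inner loop counts occurrences of c among the first components
lemma foldl_count_pairs (xs : List (String × String)) (c : String) (init : Int) :
    xs.foldl (fun counter p => if p.1 == c then counter + 1 else counter) init
      = init + ((xs.map Prod.fst).count c : Int) := by
  induction xs generalizing init with
  | nil => simp
  | cons h t ih =>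
    simp only [List.foldl_cons, List.map_cons, ih]
    by_cases hc : h.1 = c
    · simp [hc]; ring
    · simp [hc]

-- in an ≤-sorted list whose elements are all ≥ c, the first (count c) entries equal c
lemma sorted_prefix_eq (c : String) :
    ∀ (t : List String), t.Pairwise (· ≤ ·) → (∀ b ∈ t, c ≤ b) →
      ∀ m, m ≤ t.count c → ∀ j, j < m → t.getD j "" = c := by
  intro t
  induction t with
  | nil => intro _ _ m hm j hj; simp at hm; omega
  | cons b t' ih =>
    intro hp hge m hm j hj
    rcases List.pairwise_cons.mp hp with ⟨hb, hp'⟩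
    by_cases hbc : b = c
    · subst hbc
      cases j with
      | zero => simp
      | succ j' =>
        simp only [List.getD_cons_succ]
        have hcnt : (b :: t').count b = t'.count b + 1 := by simp
        exact ih hp' (fun x hx => hb x hx) (m - 1) (by omega) j' (by omega)
    · exfalso
      have hcb : c ≤ b := hge b (by simp)
      have hzero : t'.count c = 0 := by
        rw [List.count_eq_zero]
        intro hc
        exact hbc (le_antisymm (hb c hc) hcb)
      have : (b :: t').count c = 0 := by
        simp [hzero, hbc]
      omega

-- a value occurring ≥ 7 times in an ≤-sorted list yields a 7-window with equal endpoints
lemma count_to_window (c : String) :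
    ∀ (s : List String), s.Pairwise (· ≤ ·) → 7 ≤ s.count c →
      ∃ i, i + 6 < s.length ∧ s.getD i "" = s.getD (i + 6) "" := by
  intro s
  induction s with
  | nil => intro _ h; simp at h
  | cons a t ih =>
    intro hp hcnt
    rcases List.pairwise_cons.mp hp with ⟨ha, hp'⟩
    by_cases hac : a = c
    · subst hac
      have h6 : 6 ≤ t.count a := by
        have : (a :: t).count a = t.count a + 1 := by simp
        omega
      have hlen : 6 ≤ t.length := le_trans h6 (List.count_le_length)
      refine ⟨0, by simp; omega, ?_⟩
      have h5 := sorted_prefix_eq a t hp' (fun b hb => ha b hb) 6 h6 5 (by omega)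
      simp only [List.getD_cons_zero, List.getD_cons_succ]
      exact h5.symm
    · have : (a :: t).count c = t.count c := by simp [hac]
      rcases ih hp' (by omega) with ⟨i, hil, hie⟩
      exact ⟨i + 1, by simp; omega, by simpa using hie⟩

-- getD-monotonicity of a pairwise-≤ list
lemma pairwise_getD_mono (s : List String) (hp : s.Pairwise (· ≤ ·))
    {i j : Nat} (hij : i ≤ j) (hj : j < s.length) :
    s.getD i "" ≤ s.getD j "" := by
  rcases Nat.eq_or_lt_of_le hij with h | h
  · subst h; exact le_refl _
  · have hi : i < s.length := lt_trans h hj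
    rw [List.getD_eq_getElem _ _ hi, List.getD_eq_getElem _ _ hj]
    exact List.pairwise_iff_getElem.mp hp i j hi hj h

-- a 7-window with equal endpoints in an ≤-sorted list yields a value occurring ≥ 7 times
lemma window_to_count (s : List String) (hp : s.Pairwise (· ≤ ·))
    (i : Nat) (hil : i + 6 < s.length) (hie : s.getD i "" = s.getD (i + 6) "") :
    7 ≤ s.count (s.getD i "") := by
  set c := s.getD i "" with hc
  -- every entry between i and i+6 equals c
  have hall : ∀ j, i ≤ j → j ≤ i + 6 → s.getD j "" = c := by
    intro j h1 h2
    have hle1 : c ≤ s.getD j "" := pairwise_getD_mono s hp h1 (by omega)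
    have hle2 : s.getD j "" ≤ s.getD (i+6) "" := pairwise_getD_mono s hp h2 hil
    rw [← hie] at hle2
    exact le_antisymm hle2 hle1
  -- the 7 entries (s.drop i).take 7 all equal c
  have hseg : ∀ b ∈ (s.drop i).take 7, b = c := by
    intro b hb
    rcases List.mem_take_iff_getElem.mp hb with ⟨j, hj, hbe⟩
    have hjlt : j < 7 := by
      have := hj; omega
    have hjs : i + j < s.length := by
      have hdl : (s.drop i).length = s.length - i := List.length_drop
      omega
    rw [List.getElem_drop] at hbe
    have := hall (i + j) (by omega) (by omega)
    rw [List.getD_eq_getElem _ _ hjs] at this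
    rw [← hbe]
    exact this
  have hlen7 : ((s.drop i).take 7).length = 7 := by
    rw [List.length_take, List.length_drop]; omega
  have hcnt7 : ((s.drop i).take 7).count c = 7 := by
    rw [List.count_eq_length.mpr (fun b hb => (hseg b hb).symm), hlen7]
  calc 7 = ((s.drop i).take 7).count c := hcnt7.symm
    _ ≤ (s.drop i).count c := by
        conv_rhs => rw [← List.take_append_drop 7 (s.drop i)]
        rw [List.count_append]; omega
    _ ≤ s.count c := by
        conv_rhs => rw [← List.take_append_drop i s]
        rw [List.count_append]; omega

-- B returns false iff some relevant city occurs more than 6 times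
lemma alt_false_iff (xs : List (String × String)) :
    is_parziale_valid_py_alt xs = false ↔
      ∃ c ∈ (["Genova", "Torino", "Milano"] : List String),
        7 ≤ (xs.map Prod.fst).count c := by
  unfold is_parziale_valid_py_alt
  set fl := (xs.map (fun p => p.1)).filter
      (fun citta => citta == "Genova" || citta == "Torino" || citta == "Milano") with hfl
  set s := PySem.List.sorted fl (fun x => x) false with hs
  have hperm : s.Perm fl := PySem.List.sorted_perm fl _ false
  have hpw : s.Pairwise (· ≤ ·) := by
    have := PySem.List.sorted_pairwise (xs := fl) (key := fun x : String => x)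
    simpa using this
  have hcount : ∀ c : String, s.count c = fl.count c := fun c => hperm.count_eq c
  constructor
  · intro hfalse
    rcases List.all_eq_false.mp hfalse with ⟨i, hi, hne⟩
    have hilen : i + 6 < s.length := by
      have := List.mem_range.mp hi
      omega
    have heq : s.getD i "" = s.getD (i + 6) "" := by simpa using hne
    have h7 : 7 ≤ s.count (s.getD i "") := window_to_count s hpw i hilen heq
    set c := s.getD i "" with hc
    have hcmem : c ∈ s := by
      have : 0 < s.count c := by omega
      exact List.count_pos_iff.mp this
    have hcfl : c ∈ fl := hperm.mem_iff.mp hcmem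
    have hpred : (c == "Genova" || c == "Torino" || c == "Milano") = true := by
      rw [hfl] at hcfl
      exact (List.mem_filter.mp hcfl).2
    have hcfl' : fl.count c = ((xs.map Prod.fst).count c) := by
      rw [hfl]
      exact List.count_filter hpred
    refine ⟨c, ?_, by rw [← hcfl', ← hcount]; exact h7⟩
    simp only [Bool.or_eq_true, beq_iff_eq] at hpred
    rcases hpred with (h | h) | h <;> simp [h]
  · rintro ⟨c, hcmem, h7⟩
    have hpred : (c == "Genova" || c == "Torino" || c == "Milano") = true := by
      simp only [List.mem_cons, List.not_mem_nil, or_false] at hcmem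
      rcases hcmem with h | h | h <;> simp [h]
    have hcfl' : fl.count c = ((xs.map Prod.fst).count c) := by
      rw [hfl]
      exact List.count_filter hpred
    have h7s : 7 ≤ s.count c := by rw [hcount, hcfl']; exact h7
    rcases count_to_window c s hpw h7s with ⟨i, hil, hie⟩
    show (List.range (s.length - 6)).all (fun i => s.getD i "" != s.getD (i + 6) "") = false
    apply List.all_eq_false.mpr
    refine ⟨i, List.mem_range.mpr (by omega), ?_⟩
    simp only [List.getD_eq_getElem?_getD] at hie
    simp [hie]

-- ===== VERDICT (by name: the statement is the Claim_ definition above) =====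
theorem is_parziale_valid_py_spec : Claim_equal_is_parziale_valid_py := by
  intro xs _
  unfold Spec_is_parziale_valid_py
  by_cases hb : is_parziale_valid_py_alt xs = false
  · rcases (alt_false_iff xs).mp hb with ⟨c, hcmem, h7⟩
    rw [hb]
    unfold is_parziale_valid_py
    simp only [foldl_count_pairs, zero_add]
    simp only [List.mem_cons, List.not_mem_nil, or_false] at hcmem
    rcases hcmem with h | h | h <;> subst h <;> split_ifs <;> first | rfl | omega
  · have hbt : is_parziale_valid_py_alt xs = true := by
      cases h : is_parziale_valid_py_alt xs
      · exact absurd h hb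
      · rfl
    rw [hbt]
    unfold is_parziale_valid_py
    simp only [foldl_count_pairs, zero_add]
    have hnone : ¬ ∃ c ∈ (["Genova", "Torino", "Milano"] : List String),
        7 ≤ (xs.map Prod.fst).count c := fun h => hb ((alt_false_iff xs).mpr h)
    push Not at hnone
    have hG := hnone "Genova" (by simp)
    have hT := hnone "Torino" (by simp)
    have hM := hnone "Milano" (by simp)
    split_ifs with h1 h2 h3 <;> first | rfl | omega
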